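-- pv_equiv track=rewrite | github.com/luminainterface/luminainterface | services/lora-coordination-hub/coordination_strategies.py | _select_best_primary_system
-- ===== SOURCE A (Python) =====
-- from typing import Dict, List, Any, Optional
--
-- def _select_best_primary_system(available_systems: List[str]) -> str:
--     """Select the best system to serve as primary processor"""
--
--     # Priority order for primary processing
--     priority_order = [
--         "npu_enhanced_lora",
--         "enhanced_prompt_lora",
--         "optimal_lora_router",
--         "jarvis_chat",
--         "npu_adapter_selector"
--     ]
--
--     for system in priority_order:
--         if system in available_systems:
--             return system
--
--     # Return first available if none match priority
--     return available_systems[0] if available_systems else ""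
-- ===== SOURCE B (Python) =====
-- def _select_best_primary_system(available_systems):
--     """Select the best system to serve as primary processor."""
--     priority_order = [
--         "npu_enhanced_lora",
--         "enhanced_prompt_lora",
--         "optimal_lora_router",
--         "jarvis_chat",
--         "npu_adapter_selector",
--     ]
--     if not available_systems:
--         return ""
--     rank = {s: i for i, s in enumerate(priority_order)}
--     # min is stable: ties (all-sentinel case) yield the first available system
--     return min(available_systems, key=lambda s: rank.get(s, len(priority_order)))
-- ===== Notes on version B (the rewrite author's own statement) =====
-- stated objective: idiomatic
-- what changed: Instead of scanning the priority list and testing membership of each priority name in available_systems, B builds a rank index once and takes the stable first minimum of available_systems under that rank (unranked systems share the sentinel rank len(priority_order)), scanning the input list once.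
import Mathlib
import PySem

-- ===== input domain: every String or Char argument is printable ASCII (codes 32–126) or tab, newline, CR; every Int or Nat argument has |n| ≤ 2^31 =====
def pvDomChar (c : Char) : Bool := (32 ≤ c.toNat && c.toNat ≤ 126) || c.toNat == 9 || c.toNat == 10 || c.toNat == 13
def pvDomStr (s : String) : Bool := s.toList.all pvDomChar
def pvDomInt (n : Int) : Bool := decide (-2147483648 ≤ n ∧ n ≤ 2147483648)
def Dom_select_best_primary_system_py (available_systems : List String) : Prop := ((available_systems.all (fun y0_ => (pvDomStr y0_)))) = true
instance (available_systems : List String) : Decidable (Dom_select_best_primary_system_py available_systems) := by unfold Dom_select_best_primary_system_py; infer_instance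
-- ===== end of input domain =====

-- B replaces A's priority-list scan with membership tests by a one-pass stable
-- first-minimum of available_systems under a rank index (objective: idiomatic).


-- ===== PORT A =====
def pvPriorityA : List String :=
  ["npu_enhanced_lora", "enhanced_prompt_lora", "optimal_lora_router",
   "jarvis_chat", "npu_adapter_selector"]

-- 'for system in priority_order: if system in available_systems: return system'
def pvLoopA (priority available_systems : List String) : Option String :=
  match priority with
  | [] => none
  | p :: ps => if p ∈ available_systems then some p else pvLoopA ps available_systems

def select_best_primary_system_py (available_systems : List String) : String :=
  match pvLoopA pvPriorityA available_systems with
  | some s => s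
  | none =>  -- 'return available_systems[0] if available_systems else ""'
    match available_systems with
    | [] => ""
    | x :: _ => x

-- ===== PORT B =====
def pvPriorityB : List String :=
  ["npu_enhanced_lora", "enhanced_prompt_lora", "optimal_lora_router",
   "jarvis_chat", "npu_adapter_selector"]

-- rank = {s: i for i, s in enumerate(priority_order)}
def pvRankB : PySem.Dict String Int :=
  (PySem.List.enumerate pvPriorityB).foldl
    (fun acc (p : Int × String) => acc.insert p.2 p.1) PySem.Dict.empty

-- key=lambda s: rank.get(s, len(priority_order))
def pvKeyB (s : String) : Int := pvRankB.getD s (Int.ofNat pvPriorityB.length)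

def select_best_primary_system_py_alt (available_systems : List String) : String :=
  match available_systems with
  | [] => ""
  | x :: xs =>
    -- exact port of Python's min(..., key=...): one pass, ties keep the earlier element
    xs.foldl (fun best s => if pvKeyB s < pvKeyB best then s else best) x

-- ===== PRECONDITION & SPEC =====
def Spec_select_best_primary_system_py (available_systems : List String) (out : String) : Prop := out = select_best_primary_system_py_alt available_systems
instance (available_systems : List String) (out : String) : Decidable (Spec_select_best_primary_system_py available_systems out) := by unfold Spec_select_best_primary_system_py; infer_instance

-- ===== CLAIM (what is proved, stated in full; the proofs are below) =====
def Claim_equal_select_best_primary_system_py : Prop := ∀ (available_systems : List String), Dom_select_best_primary_system_py available_systems → Spec_select_best_primary_system_py available_systems (select_best_primary_system_py available_systems)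

-- ===== LEMMAS AND PROOFS =====

theorem pvKeyB_eq (s : String) :
    pvKeyB s =
      if s = "npu_enhanced_lora" then 0
      else if s = "enhanced_prompt_lora" then 1
      else if s = "optimal_lora_router" then 2
      else if s = "jarvis_chat" then 3
      else if s = "npu_adapter_selector" then 4
      else 5 := by
  simp [pvKeyB, pvRankB, pvPriorityB, PySem.List.enumerate_cons, PySem.Dict.getD_insert]
  split_ifs <;> simp_all

theorem pvKeyB_nonneg (s : String) : 0 ≤ pvKeyB s := by
  rw [pvKeyB_eq]; split_ifs <;> omega

theorem pvk0 : pvKeyB "npu_enhanced_lora" = 0 := by decide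

theorem pvKeyB_eq_0 (s : String) (h : pvKeyB s = 0) : s = "npu_enhanced_lora" := by
  rw [pvKeyB_eq] at h; split_ifs at h <;> first | assumption | omega

theorem pvk1 : pvKeyB "enhanced_prompt_lora" = 1 := by decide

theorem pvKeyB_eq_1 (s : String) (h : pvKeyB s = 1) : s = "enhanced_prompt_lora" := by
  rw [pvKeyB_eq] at h; split_ifs at h <;> first | assumption | omega

theorem pvk2 : pvKeyB "optimal_lora_router" = 2 := by decide

theorem pvKeyB_eq_2 (s : String) (h : pvKeyB s = 2) : s = "optimal_lora_router" := by
  rw [pvKeyB_eq] at h; split_ifs at h <;> first | assumption | omega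

theorem pvk3 : pvKeyB "jarvis_chat" = 3 := by decide

theorem pvKeyB_eq_3 (s : String) (h : pvKeyB s = 3) : s = "jarvis_chat" := by
  rw [pvKeyB_eq] at h; split_ifs at h <;> first | assumption | omega

theorem pvk4 : pvKeyB "npu_adapter_selector" = 4 := by decide

theorem pvKeyB_eq_4 (s : String) (h : pvKeyB s = 4) : s = "npu_adapter_selector" := by
  rw [pvKeyB_eq] at h; split_ifs at h <;> first | assumption | omega

theorem pvFold_mem (x : String) (xs : List String) :
    xs.foldl (fun best s => if pvKeyB s < pvKeyB best then s else best) x ∈ x :: xs := by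
  induction xs generalizing x with
  | nil => exact List.mem_cons_self
  | cons y ys ih =>
    simp only [List.foldl_cons]
    have h := ih (if pvKeyB y < pvKeyB x then y else x)
    rw [List.mem_cons] at h
    rcases h with h | h
    · rw [h]
      split_ifs
      · exact List.mem_cons_of_mem _ List.mem_cons_self
      · exact List.mem_cons_self
    · exact List.mem_cons_of_mem _ (List.mem_cons_of_mem _ h)

theorem pvFold_min (x : String) (xs : List String) :
    ∀ y ∈ x :: xs,
      pvKeyB (xs.foldl (fun best s => if pvKeyB s < pvKeyB best then s else best) x) ≤ pvKeyB y := by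
  induction xs generalizing x with
  | nil =>
    intro y hy
    rw [List.mem_cons] at hy
    rcases hy with h | h
    · rw [h]; exact le_refl _
    · exact absurd h (List.not_mem_nil)
  | cons z zs ih =>
    intro y hy
    simp only [List.foldl_cons]
    have hstate := ih (if pvKeyB z < pvKeyB x then z else x)
      (if pvKeyB z < pvKeyB x then z else x) List.mem_cons_self
    rw [List.mem_cons] at hy
    rcases hy with h | hy2
    · rw [h]
      split_ifs at hstate ⊢ with hc <;> omega
    · rw [List.mem_cons] at hy2
      rcases hy2 with h | h
      · rw [h]
        split_ifs at hstate ⊢ with hc <;> omega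
      · exact ih _ y (List.mem_cons_of_mem _ h)

theorem pvFold_stable (x : String) (xs : List String)
    (h : ∀ y ∈ xs, ¬ pvKeyB y < pvKeyB x) :
    xs.foldl (fun best s => if pvKeyB s < pvKeyB best then s else best) x = x := by
  induction xs with
  | nil => rfl
  | cons y ys ih =>
    simp only [List.foldl_cons, if_neg (h y List.mem_cons_self)]
    exact ih (fun z hz => h z (List.mem_cons_of_mem _ hz))

-- ===== VERDICT (by name: the statement is the Claim_ definition above) =====
theorem select_best_primary_system_py_spec : Claim_equal_select_best_primary_system_py := by
  unfold Claim_equal_select_best_primary_system_py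
  intro avail _
  unfold Spec_select_best_primary_system_py
  match avail with
  | [] => rfl
  | x :: xs =>
    have hBalt : select_best_primary_system_py_alt (x :: xs) =
        xs.foldl (fun best s => if pvKeyB s < pvKeyB best then s else best) x := rfl
    have hmem := pvFold_mem x xs
    have hmin := pvFold_min x xs
    generalize hM : xs.foldl (fun best s => if pvKeyB s < pvKeyB best then s else best) x = m at hBalt hmem hmin
    have hnn := pvKeyB_nonneg m
    by_cases h0 : "npu_enhanced_lora" ∈ x :: xs
    · have hA : select_best_primary_system_py (x :: xs) = "npu_enhanced_lora" := by
        simp [select_best_primary_system_py, pvLoopA, pvPriorityA, h0]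
      rw [hA, hBalt]
      have hb := hmin _ h0
      rw [pvk0] at hb
      have hki : pvKeyB m = 0 := by omega
      exact (pvKeyB_eq_0 m hki).symm
    by_cases h1 : "enhanced_prompt_lora" ∈ x :: xs
    · have hA : select_best_primary_system_py (x :: xs) = "enhanced_prompt_lora" := by
        simp [select_best_primary_system_py, pvLoopA, pvPriorityA, h1, h0]
      rw [hA, hBalt]
      have hb := hmin _ h1
      rw [pvk1] at hb
      have e0 : pvKeyB m ≠ 0 := fun hh => h0 ((pvKeyB_eq_0 m hh) ▸ hmem)
      have hki : pvKeyB m = 1 := by omega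
      exact (pvKeyB_eq_1 m hki).symm
    by_cases h2 : "optimal_lora_router" ∈ x :: xs
    · have hA : select_best_primary_system_py (x :: xs) = "optimal_lora_router" := by
        simp [select_best_primary_system_py, pvLoopA, pvPriorityA, h2, h0, h1]
      rw [hA, hBalt]
      have hb := hmin _ h2
      rw [pvk2] at hb
      have e0 : pvKeyB m ≠ 0 := fun hh => h0 ((pvKeyB_eq_0 m hh) ▸ hmem)
      have e1 : pvKeyB m ≠ 1 := fun hh => h1 ((pvKeyB_eq_1 m hh) ▸ hmem)
      have hki : pvKeyB m = 2 := by omega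
      exact (pvKeyB_eq_2 m hki).symm
    by_cases h3 : "jarvis_chat" ∈ x :: xs
    · have hA : select_best_primary_system_py (x :: xs) = "jarvis_chat" := by
        simp [select_best_primary_system_py, pvLoopA, pvPriorityA, h3, h0, h1, h2]
      rw [hA, hBalt]
      have hb := hmin _ h3
      rw [pvk3] at hb
      have e0 : pvKeyB m ≠ 0 := fun hh => h0 ((pvKeyB_eq_0 m hh) ▸ hmem)
      have e1 : pvKeyB m ≠ 1 := fun hh => h1 ((pvKeyB_eq_1 m hh) ▸ hmem)
      have e2 : pvKeyB m ≠ 2 := fun hh => h2 ((pvKeyB_eq_2 m hh) ▸ hmem)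
      have hki : pvKeyB m = 3 := by omega
      exact (pvKeyB_eq_3 m hki).symm
    by_cases h4 : "npu_adapter_selector" ∈ x :: xs
    · have hA : select_best_primary_system_py (x :: xs) = "npu_adapter_selector" := by
        simp [select_best_primary_system_py, pvLoopA, pvPriorityA, h4, h0, h1, h2, h3]
      rw [hA, hBalt]
      have hb := hmin _ h4
      rw [pvk4] at hb
      have e0 : pvKeyB m ≠ 0 := fun hh => h0 ((pvKeyB_eq_0 m hh) ▸ hmem)
      have e1 : pvKeyB m ≠ 1 := fun hh => h1 ((pvKeyB_eq_1 m hh) ▸ hmem)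
      have e2 : pvKeyB m ≠ 2 := fun hh => h2 ((pvKeyB_eq_2 m hh) ▸ hmem)
      have e3 : pvKeyB m ≠ 3 := fun hh => h3 ((pvKeyB_eq_3 m hh) ▸ hmem)
      have hki : pvKeyB m = 4 := by omega
      exact (pvKeyB_eq_4 m hki).symm
    have hA : select_best_primary_system_py (x :: xs) = x := by
      simp [select_best_primary_system_py, pvLoopA, pvPriorityA, h0, h1, h2, h3, h4]
    rw [hA, hBalt]
    have hall : ∀ y ∈ xs, ¬ pvKeyB y < pvKeyB x := by
      intro y hy
      have hy5 : pvKeyB y = 5 := by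
        rw [pvKeyB_eq]
        split_ifs with c0 c1 c2 c3 c4
        · exact absurd (c0 ▸ (List.mem_cons_of_mem x hy)) h0
        · exact absurd (c1 ▸ (List.mem_cons_of_mem x hy)) h1
        · exact absurd (c2 ▸ (List.mem_cons_of_mem x hy)) h2
        · exact absurd (c3 ▸ (List.mem_cons_of_mem x hy)) h3
        · exact absurd (c4 ▸ (List.mem_cons_of_mem x hy)) h4
        · rfl
      have hx5 : pvKeyB x = 5 := by
        rw [pvKeyB_eq]
        split_ifs with c0 c1 c2 c3 c4
        · exact absurd (c0 ▸ (List.mem_cons_self)) h0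
        · exact absurd (c1 ▸ (List.mem_cons_self)) h1
        · exact absurd (c2 ▸ (List.mem_cons_self)) h2
        · exact absurd (c3 ▸ (List.mem_cons_self)) h3
        · exact absurd (c4 ▸ (List.mem_cons_self)) h4
        · rfl
      omega
    have hst := pvFold_stable x xs hall
    rw [hM] at hst
    exact hst.symm
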